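-- pv_equiv track=rewrite | github.com/utcs-scea/KernMLOps | python/kernmlops/models/hugepage_tensors.py | page_map_get
-- ===== SOURCE A (Python) =====
-- def page_map_get(page_map, address:int):
--   count = 0
--   rd_address = (address >> 21) << 21
--   ru_address = rd_address + (1 << 21)
--   for i in range(rd_address, ru_address, 1<<12):
--     for line in page_map:
--       if line[0] <= i and line[1] > i :
--         count+=1
--         break
--   return count
-- ===== SOURCE B (Python) =====
-- def page_map_get(page_map, address: int):
--     rd_address = (address >> 21) << 21
--     covered = [False] * 512
--     for line in page_map:
--         lo = -((rd_address - line[0]) >> 12)   # ceil((line[0]-rd)/4096)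
--         hi = -((rd_address - line[1]) >> 12)   # ceil((line[1]-rd)/4096)
--         for k in range(max(lo, 0), min(hi, 512)):
--             covered[k] = True
--     return sum(covered)
-- ===== Notes on version B (the rewrite author's own statement) =====
-- stated objective: faster
-- what changed: Instead of scanning all intervals for each of the 512 pages (with break on first hit), B makes one pass over the intervals, converting each to a clipped page-index window by ceil-division and marking a 512-slot bitmap, then sums the bitmap.
-- outside the precondition, e.g. on page_map_get([[0, 4194304], [5]], 0): A returns 512, B raises IndexError
import Mathlib
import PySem

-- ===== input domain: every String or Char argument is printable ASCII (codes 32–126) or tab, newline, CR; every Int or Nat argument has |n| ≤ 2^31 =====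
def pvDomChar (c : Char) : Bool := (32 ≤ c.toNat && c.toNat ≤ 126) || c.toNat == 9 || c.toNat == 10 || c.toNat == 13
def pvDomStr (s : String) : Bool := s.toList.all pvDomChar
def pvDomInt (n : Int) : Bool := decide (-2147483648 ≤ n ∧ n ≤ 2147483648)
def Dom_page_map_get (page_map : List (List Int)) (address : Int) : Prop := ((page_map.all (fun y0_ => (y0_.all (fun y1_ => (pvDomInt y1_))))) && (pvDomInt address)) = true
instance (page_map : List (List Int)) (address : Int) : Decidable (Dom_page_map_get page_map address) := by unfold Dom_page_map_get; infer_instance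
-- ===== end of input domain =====

-- B replaces A's 512×n scan (for each 4KB page, scan all intervals) by one pass over the
-- intervals marking the covered slots of a 512-entry bitmap, then summing it: O(n+512) vs O(512·n).

-- ===== PORT A =====
-- the inner 'for line in page_map: if line[0] <= i and line[1] > i: count += 1; break'
def pmgInner (lines : List (List Int)) (i : Int) (count : Int) : Int :=
  match lines with
  | [] => count
  | line :: rest =>
      if PySem.List.pyGetD line 0 0 ≤ i ∧ PySem.List.pyGetD line 1 0 > i then count + 1
      else pmgInner rest i count

def page_map_get (page_map : List (List Int)) (address : Int) : Int :=
  let rd_address : Int := (address >>> (21:Nat)) <<< (21:Nat)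
  let ru_address : Int := rd_address + ((1:Int) <<< (21:Nat))
  (PySem.List.pyRange rd_address ru_address ((1:Int) <<< (12:Nat))).foldl
    (fun count i => pmgInner page_map i count) 0

-- ===== PORT B =====
-- 'for k in range(max(lo,0), min(hi,512)): covered[k] = True'
def pmgMark (cov : List Bool) (lo hi : Int) : List Bool :=
  (PySem.List.pyRange lo hi 1).foldl (fun c k => PySem.List.pySetD c k true) cov

def page_map_get_alt (page_map : List (List Int)) (address : Int) : Int :=
  let rd_address : Int := (address >>> (21:Nat)) <<< (21:Nat)
  let covered : List Bool :=
    page_map.foldl (fun cov line =>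
      let lo : Int := -((rd_address - PySem.List.pyGetD line 0 0) >>> (12:Nat))
      let hi : Int := -((rd_address - PySem.List.pyGetD line 1 0) >>> (12:Nat))
      pmgMark cov (max lo 0) (min hi 512)) (List.replicate 512 false)
  covered.foldl (fun acc b => acc + if b then 1 else 0) 0

-- ===== PRECONDITION & SPEC =====
-- Pre_ excludes page_maps containing a line with fewer than 2 entries, on which A's
-- 'line[0]' / 'line[1]' can raise IndexError (slightly wider than the exact raise set:
-- a short line hidden behind an earlier break never raises, but that depends on the
-- scan order, not on the input shape alone).
def Pre_page_map_get (page_map : List (List Int)) (address : Int) : Prop :=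
  ∀ line ∈ page_map, 2 ≤ line.length
instance (page_map : List (List Int)) (address : Int) : Decidable (Pre_page_map_get page_map address) := by unfold Pre_page_map_get; infer_instance

def pvWitness_page_map_get : List (List Int) × Int := ([[0, 8192], [4096, 20480]], 5000)

def Spec_page_map_get (page_map : List (List Int)) (address : Int) (out : Int) : Prop := out = page_map_get_alt page_map address
instance (page_map : List (List Int)) (address : Int) (out : Int) : Decidable (Spec_page_map_get page_map address out) := by unfold Spec_page_map_get; infer_instance

-- ===== CLAIM (what is proved, stated in full; the proofs are below) =====
def Claim_equal_page_map_get : Prop := ∀ (page_map : List (List Int)) (address : Int), Dom_page_map_get page_map address → Pre_page_map_get page_map address → Spec_page_map_get page_map address (page_map_get page_map address)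

-- ===== LEMMAS AND PROOFS =====

-- A's inner loop-with-break is the indicator of 'some line covers i'
lemma pmgInner_eq (lines : List (List Int)) (i c : Int) :
    pmgInner lines i c =
      c + (if lines.any (fun line =>
            decide (PySem.List.pyGetD line 0 0 ≤ i ∧ i < PySem.List.pyGetD line 1 0)) then 1 else 0) := by
  induction lines with
  | nil => simp [pmgInner]
  | cons line rest ih =>
      simp only [pmgInner, List.any_cons, gt_iff_lt]
      by_cases h : PySem.List.pyGetD line 0 0 ≤ i ∧ i < PySem.List.pyGetD line 1 0
      · simp [h]
      · simp [h, ih]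

-- pointwise effect of marking the window [lo, hi)
lemma pmgMark_get? (cov : List Bool) (lo hi : Int) (hlo : 0 ≤ lo) (hhi : hi ≤ cov.length)
    (j : Nat) :
    (pmgMark cov lo hi)[j]? = cov[j]?.map (fun b => b || decide (lo ≤ (j:Int) ∧ (j:Int) < hi)) := by
  unfold pmgMark
  by_cases h : lo < hi
  · rw [PySem.List.pyRange_one_cons h, List.foldl_cons,
      PySem.List.pySetD_of_nonneg cov true hlo]
    have hlen : (cov.set lo.toNat true).length = cov.length := List.length_set ..
    have ih := pmgMark_get? (cov.set lo.toNat true) (lo + 1) hi (by omega) (by omega) j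
    unfold pmgMark at ih
    refine ih.trans ?_
    by_cases hj : j = lo.toNat
    · subst hj
      have hjlt : lo.toNat < cov.length := by omega
      rw [List.getElem?_set_self hjlt, List.getElem?_eq_getElem hjlt]
      have hc : lo ≤ (lo.toNat : Int) ∧ (lo.toNat : Int) < hi := by constructor <;> omega
      simp
      exact Or.inr ⟨h, by omega⟩
    · rw [List.getElem?_set_ne (fun e => hj e.symm)]
      have e : (fun b : Bool => b || decide (lo + 1 ≤ (j:Int) ∧ (j:Int) < hi))
             = (fun b : Bool => b || decide (lo ≤ (j:Int) ∧ (j:Int) < hi)) := by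
        funext b; congr 1; simp only [decide_eq_decide]; omega
      rw [e]
  · rw [PySem.List.pyRange_one_eq_nil (by omega)]
    have e : decide (lo ≤ (j:Int) ∧ (j:Int) < hi) = false := by
      simp only [decide_eq_false_iff_not]; omega
    rw [List.foldl_nil, e]
    cases cov[j]? <;> simp
termination_by (hi - lo).toNat
decreasing_by omega

-- marking preserves the length
lemma pmgMark_length (cov : List Bool) (lo hi : Int) (hlo : 0 ≤ lo) (hhi : hi ≤ cov.length) :
    (pmgMark cov lo hi).length = cov.length := by
  have h0 := pmgMark_get? cov lo hi hlo hhi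
  by_cases h : (pmgMark cov lo hi).length ≤ cov.length
  · by_contra hne
    have hlt : (pmgMark cov lo hi).length < cov.length := by omega
    have := h0 (pmgMark cov lo hi).length
    rw [List.getElem?_eq_none (le_refl _), List.getElem?_eq_getElem hlt] at this
    simp at this
  · have hlt : cov.length < (pmgMark cov lo hi).length := by omega
    have := h0 cov.length
    rw [List.getElem?_eq_none (le_refl _), List.getElem?_eq_getElem hlt] at this
    simp at this

-- per-line, per-slot: the clipped page-index window equals A's address test (any rd, any line)
lemma pmg_window_iff (rd l0 l1 : Int) (j : Nat) (hj : j < 512) :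
    (max (-((rd - l0) >>> (12:Nat))) 0 ≤ (j:Int) ∧ (j:Int) < min (-((rd - l1) >>> (12:Nat))) 512)
      ↔ (l0 ≤ rd + 4096 * (j:Int) ∧ rd + 4096 * (j:Int) < l1) := by
  have e0 : (rd - l0) >>> (12:Nat) = (rd - l0) / 4096 := by
    rw [Int.shiftRight_eq_div_pow]; norm_num
  have e1 : (rd - l1) >>> (12:Nat) = (rd - l1) / 4096 := by
    rw [Int.shiftRight_eq_div_pow]; norm_num
  rw [e0, e1]
  constructor <;> intro ⟨a, b⟩ <;> constructor <;> omega

-- the body of B's outer fold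
def pmgStep (rd : Int) (cov : List Bool) (line : List Int) : List Bool :=
  pmgMark cov (max (-((rd - PySem.List.pyGetD line 0 0) >>> (12:Nat))) 0)
              (min (-((rd - PySem.List.pyGetD line 1 0) >>> (12:Nat))) 512)

lemma pmgStep_length (rd : Int) (cov : List Bool) (line : List Int) (h : cov.length = 512) :
    (pmgStep rd cov line).length = 512 := by
  unfold pmgStep
  rw [pmgMark_length _ _ _ (by omega) (by simp [h])]
  exact h

-- the bitmap after the outer fold, pointwise
lemma pmg_covered (rd : Int) (lines : List (List Int)) (cov : List Bool) (hlen : cov.length = 512)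
    (j : Nat) (hj : j < 512) :
    (lines.foldl (pmgStep rd) cov)[j]?
      = cov[j]?.map (fun b => b || lines.any (fun line =>
          decide (PySem.List.pyGetD line 0 0 ≤ rd + 4096 * (j:Int)
            ∧ rd + 4096 * (j:Int) < PySem.List.pyGetD line 1 0))) := by
  induction lines generalizing cov with
  | nil =>
      cases hq : cov[j]? <;> simp [hq]
  | cons line rest ih =>
      simp only [List.foldl_cons, List.any_cons]
      rw [ih (pmgStep rd cov line) (pmgStep_length rd cov line hlen)]
      unfold pmgStep
      rw [pmgMark_get? _ _ _ (by omega) (by simp [hlen]) j]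
      cases hq : cov[j]? with
      | none => simp
      | some b =>
          simp only [Option.map_some]
          rw [show (decide (max (-((rd - PySem.List.pyGetD line 0 0) >>> (12:Nat))) 0 ≤ (j:Int)
                ∧ (j:Int) < min (-((rd - PySem.List.pyGetD line 1 0) >>> (12:Nat))) 512))
              = decide (PySem.List.pyGetD line 0 0 ≤ rd + 4096 * (j:Int)
                ∧ rd + 4096 * (j:Int) < PySem.List.pyGetD line 1 0) from by
            simp only [decide_eq_decide]; exact pmg_window_iff rd _ _ j hj]
          rw [Bool.or_assoc]

lemma pmg_fold_length (rd : Int) (lines : List (List Int)) (cov : List Bool)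
    (hlen : cov.length = 512) : (lines.foldl (pmgStep rd) cov).length = 512 := by
  induction lines generalizing cov with
  | nil => exact hlen
  | cons line rest ih => exact ih _ (pmgStep_length rd cov line hlen)

-- counting a 0/1 fold is countP
lemma pmg_count_fold (xs : List Bool) :
    xs.foldl (fun acc b => acc + if b then 1 else 0) (0:Int) = (xs.countP id : Int) := by
  rw [PySem.List.foldl_add xs (fun b => if b then 1 else 0) 0]
  rw [show (fun b => if b then (1:Int) else 0) = (fun b => if (id b : Bool) then (1:Int) else 0) from rfl]
  rw [PySem.List.sum_map_ite_one_zero id xs, zero_add]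

-- ===== VERDICT (by name: the statement is the Claim_ definition above) =====
set_option maxRecDepth 4096 in
theorem page_map_get_spec : Claim_equal_page_map_get := by
  intro page_map address _ _
  unfold Spec_page_map_get
  simp only [page_map_get, page_map_get_alt]
  set rd : Int := (address >>> (21:Nat)) <<< (21:Nat) with hrd
  -- A side: fold over the 512 page addresses
  have hrange : PySem.List.pyRange rd (rd + (1:Int) <<< (21:Nat)) ((1:Int) <<< (12:Nat))
      = (List.range 512).map (fun k : Nat => rd + 4096 * (k:Int)) := by
    rw [show ((1:Int) <<< (21:Nat)) = 2097152 from rfl, show ((1:Int) <<< (12:Nat)) = 4096 from rfl]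
    rw [PySem.List.pyRange_of_pos rd (rd + 2097152) (by norm_num)]
    have h512 : (if rd < rd + 2097152 then ((rd + 2097152 - rd + 4096 - 1) / 4096).toNat else 0) = 512 := by
      rw [if_pos (by omega)]; omega
    rw [h512]
  rw [hrange]
  have hA : ∀ (l : List Int) (c : Int), l.foldl (fun count i => pmgInner page_map i count) c
      = c + (l.map (fun i => if page_map.any (fun line =>
          decide (PySem.List.pyGetD line 0 0 ≤ i ∧ i < PySem.List.pyGetD line 1 0))
          then (1:Int) else 0)).sum := by
    intro l
    induction l with
    | nil => intro c; simp
    | cons x xs ih =>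
        intro c
        simp only [List.foldl_cons, List.map_cons, List.sum_cons]
        rw [pmgInner_eq, ih]
        ring
  rw [hA, List.map_map]
  rw [show ((fun i => if page_map.any (fun line =>
        decide (PySem.List.pyGetD line 0 0 ≤ i ∧ i < PySem.List.pyGetD line 1 0))
        then (1:Int) else 0) ∘ (fun k : Nat => rd + 4096 * (k:Int)))
      = (fun k : Nat => if page_map.any (fun line =>
        decide (PySem.List.pyGetD line 0 0 ≤ rd + 4096 * (k:Int)
          ∧ rd + 4096 * (k:Int) < PySem.List.pyGetD line 1 0)) then (1:Int) else 0) from rfl]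
  rw [PySem.List.sum_map_ite_one_zero _ (List.range 512), zero_add]
  -- B side
  rw [show (fun cov line =>
      pmgMark cov (max (-((rd - PySem.List.pyGetD line 0 0) >>> (12:Nat))) 0)
                  (min (-((rd - PySem.List.pyGetD line 1 0) >>> (12:Nat))) 512))
      = pmgStep rd from rfl]
  -- the final bitmap IS the per-page existence map
  have hcov : (page_map.foldl (pmgStep rd) (List.replicate 512 false))
      = (List.range 512).map (fun j : Nat => page_map.any (fun line =>
          decide (PySem.List.pyGetD line 0 0 ≤ rd + 4096 * (j:Int)
            ∧ rd + 4096 * (j:Int) < PySem.List.pyGetD line 1 0))) := by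
    apply List.ext_getElem?
    intro j
    by_cases hj : j < 512
    · rw [pmg_covered rd page_map (List.replicate 512 false) (by simp) j hj,
        List.getElem?_replicate]
      simp [hj]
    · rw [List.getElem?_eq_none, List.getElem?_eq_none]
      · simp; omega
      · rw [pmg_fold_length rd page_map _ (by simp)]; omega
  rw [pmg_count_fold, hcov, List.countP_map]
  rfl
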